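-- pv_equiv track=rewrite | github.com/kimeisele/steward | steward/briefing.py | _group_services
-- ===== SOURCE A (Python) =====
-- def _group_services(svc_names: list[str]) -> dict[str, list[str]]:
--     """Group services by functional area for compact display."""
--     groups: dict[str, list[str]] = {
--         "Cognitive": [],
--         "Memory": [],
--         "Safety": [],
--         "Federation": [],
--         "Healing": [],
--         "Other": [],
--     }
--
--     cognitive = {"SVC_ATTENTION", "SVC_MAHA_LLM", "SVC_COMPRESSION", "SVC_ANTARANGA", "SVC_VENU", "SVC_SIKSASTAKAM"}
--     memory = {"SVC_MEMORY", "SVC_SYNAPSE_STORE", "SVC_CACHE", "SVC_KNOWLEDGE_GRAPH", "SVC_TASK_MANAGER"}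
--     safety = {"SVC_SAFETY_GUARD", "SVC_NARASIMHA", "SVC_INTEGRITY", "SVC_DIAMOND"}
--     federation = {
--         "SVC_FEDERATION",
--         "SVC_FEDERATION_TRANSPORT",
--         "SVC_FEDERATION_RELAY",
--         "SVC_GIT_NADI_SYNC",
--         "SVC_REAPER",
--         "SVC_MARKETPLACE",
--     }
--     healing = {"SVC_IMMUNE", "SVC_FEEDBACK", "SVC_OUROBOROS"}
--
--     for name in svc_names:
--         if name in cognitive:
--             groups["Cognitive"].append(name)
--         elif name in memory:
--             groups["Memory"].append(name)
--         elif name in safety: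
--             groups["Safety"].append(name)
--         elif name in federation:
--             groups["Federation"].append(name)
--         elif name in healing:
--             groups["Healing"].append(name)
--         else:
--             groups["Other"].append(name)
--
--     # Remove empty groups
--     return {k: v for k, v in groups.items() if v}
-- ===== SOURCE B (Python) =====
-- _CATEGORIES = [
--     ("Cognitive", ["SVC_ATTENTION", "SVC_MAHA_LLM", "SVC_COMPRESSION", "SVC_ANTARANGA", "SVC_VENU", "SVC_SIKSASTAKAM"]),
--     ("Memory", ["SVC_MEMORY", "SVC_SYNAPSE_STORE", "SVC_CACHE", "SVC_KNOWLEDGE_GRAPH", "SVC_TASK_MANAGER"]),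
--     ("Safety", ["SVC_SAFETY_GUARD", "SVC_NARASIMHA", "SVC_INTEGRITY", "SVC_DIAMOND"]),
--     ("Federation", ["SVC_FEDERATION", "SVC_FEDERATION_TRANSPORT", "SVC_FEDERATION_RELAY", "SVC_GIT_NADI_SYNC", "SVC_REAPER", "SVC_MARKETPLACE"]),
--     ("Healing", ["SVC_IMMUNE", "SVC_FEEDBACK", "SVC_OUROBOROS"]),
-- ]
--
--
-- def _group_services(svc_names: list[str]) -> dict[str, list[str]]:
--     """Group services by functional area for compact display.
--
--     Category-major: one filtering pass per category over the input (order is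
--     preserved within each bucket; categories are disjoint, so this equals
--     item-major bucketing), then one pass collecting the uncategorized names.
--     """
--     groups: dict[str, list[str]] = {
--         label: [n for n in svc_names if n in members]
--         for label, members in _CATEGORIES
--     }
--     known = {n for _, members in _CATEGORIES for n in members}
--     groups["Other"] = [n for n in svc_names if n not in known]
--     return {k: v for k, v in groups.items() if v}
-- ===== Notes on version B (the rewrite author's own statement) =====
-- stated objective: alternative
-- what changed: Replaces A's item-major single pass with an if/elif membership chain by a category-major strategy: one filtering pass over the input per category plus one pass for uncategorized names (correct because the categories are disjoint and filtering preserves input order).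
import Mathlib
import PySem

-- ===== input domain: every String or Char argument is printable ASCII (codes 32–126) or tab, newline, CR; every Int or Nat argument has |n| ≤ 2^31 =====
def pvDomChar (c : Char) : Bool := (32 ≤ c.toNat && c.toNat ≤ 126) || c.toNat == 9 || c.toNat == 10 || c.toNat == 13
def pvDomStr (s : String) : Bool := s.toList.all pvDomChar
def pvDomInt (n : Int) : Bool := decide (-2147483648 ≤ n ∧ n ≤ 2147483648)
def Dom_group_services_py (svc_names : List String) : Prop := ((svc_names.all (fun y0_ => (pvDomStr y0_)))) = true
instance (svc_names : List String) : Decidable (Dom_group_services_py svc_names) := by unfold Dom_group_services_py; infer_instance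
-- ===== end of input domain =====

-- B groups category-major — one filtering pass per category over the input, then one
-- pass for the uncategorized names — instead of A's item-major if/elif bucketing
-- (objective: alternative; correct because the categories are disjoint).

-- ===== PORT A =====
def group_services_py (svc_names : List String) : List (String × List String) :=
  let groups : PySem.Dict String (List String) := PySem.Dict.ofList
    [("Cognitive", []), ("Memory", []), ("Safety", []), ("Federation", []), ("Healing", []), ("Other", [])]
  let cognitive : PySem.Set String := PySem.Set.ofList
    ["SVC_ATTENTION", "SVC_MAHA_LLM", "SVC_COMPRESSION", "SVC_ANTARANGA", "SVC_VENU", "SVC_SIKSASTAKAM"]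
  let memory : PySem.Set String := PySem.Set.ofList
    ["SVC_MEMORY", "SVC_SYNAPSE_STORE", "SVC_CACHE", "SVC_KNOWLEDGE_GRAPH", "SVC_TASK_MANAGER"]
  let safety : PySem.Set String := PySem.Set.ofList
    ["SVC_SAFETY_GUARD", "SVC_NARASIMHA", "SVC_INTEGRITY", "SVC_DIAMOND"]
  let federation : PySem.Set String := PySem.Set.ofList
    ["SVC_FEDERATION", "SVC_FEDERATION_TRANSPORT", "SVC_FEDERATION_RELAY", "SVC_GIT_NADI_SYNC", "SVC_REAPER", "SVC_MARKETPLACE"]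
  let healing : PySem.Set String := PySem.Set.ofList
    ["SVC_IMMUNE", "SVC_FEEDBACK", "SVC_OUROBOROS"]
  let groups := svc_names.foldl (fun g name =>
    if PySem.Set.contains cognitive name then g.modify "Cognitive" [] (· ++ [name])
    else if PySem.Set.contains memory name then g.modify "Memory" [] (· ++ [name])
    else if PySem.Set.contains safety name then g.modify "Safety" [] (· ++ [name])
    else if PySem.Set.contains federation name then g.modify "Federation" [] (· ++ [name])
    else if PySem.Set.contains healing name then g.modify "Healing" [] (· ++ [name])
    else g.modify "Other" [] (· ++ [name])) groups
  groups.items.filter (fun p => !p.2.isEmpty)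

-- ===== PORT B =====
def pvCategories : List (String × List String) :=
  [("Cognitive", ["SVC_ATTENTION", "SVC_MAHA_LLM", "SVC_COMPRESSION", "SVC_ANTARANGA", "SVC_VENU", "SVC_SIKSASTAKAM"]),
   ("Memory", ["SVC_MEMORY", "SVC_SYNAPSE_STORE", "SVC_CACHE", "SVC_KNOWLEDGE_GRAPH", "SVC_TASK_MANAGER"]),
   ("Safety", ["SVC_SAFETY_GUARD", "SVC_NARASIMHA", "SVC_INTEGRITY", "SVC_DIAMOND"]),
   ("Federation", ["SVC_FEDERATION", "SVC_FEDERATION_TRANSPORT", "SVC_FEDERATION_RELAY", "SVC_GIT_NADI_SYNC", "SVC_REAPER", "SVC_MARKETPLACE"]),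
   ("Healing", ["SVC_IMMUNE", "SVC_FEEDBACK", "SVC_OUROBOROS"])]

-- known = {n for _, members in _CATEGORIES for n in members}
def pvKnown : PySem.Set String :=
  PySem.Set.ofList (pvCategories.flatMap (fun p => p.2))

def group_services_py_alt (svc_names : List String) : List (String × List String) :=
  -- one filtering pass over svc_names per category
  let groups : PySem.Dict String (List String) :=
    PySem.Dict.ofList (pvCategories.map (fun p => (p.1, svc_names.filter (fun n => p.2.contains n))))
  -- one pass collecting the names in no category
  let groups := groups.insert "Other" (svc_names.filter (fun n => !(pvKnown.contains n)))
  groups.items.filter (fun p => !p.2.isEmpty)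

-- ===== PRECONDITION & SPEC =====
def Spec_group_services_py (svc_names : List String) (out : List (String × List String)) : Prop := out = group_services_py_alt svc_names
instance (svc_names : List String) (out : List (String × List String)) : Decidable (Spec_group_services_py svc_names out) := by unfold Spec_group_services_py; infer_instance

-- ===== CLAIM (what is proved, stated in full; the proofs are below) =====
def Claim_equal_group_services_py : Prop := ∀ (svc_names : List String), Dom_group_services_py svc_names → Spec_group_services_py svc_names (group_services_py svc_names)

-- ===== LEMMAS AND PROOFS =====

-- A's loop body, one update of the groups dict
def pvStepA (g : PySem.Dict String (List String)) (name : String) : PySem.Dict String (List String) :=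
  if PySem.Set.contains (PySem.Set.ofList
      ["SVC_ATTENTION", "SVC_MAHA_LLM", "SVC_COMPRESSION", "SVC_ANTARANGA", "SVC_VENU", "SVC_SIKSASTAKAM"]) name then g.modify "Cognitive" [] (· ++ [name])
  else if PySem.Set.contains (PySem.Set.ofList
      ["SVC_MEMORY", "SVC_SYNAPSE_STORE", "SVC_CACHE", "SVC_KNOWLEDGE_GRAPH", "SVC_TASK_MANAGER"]) name then g.modify "Memory" [] (· ++ [name])
  else if PySem.Set.contains (PySem.Set.ofList
      ["SVC_SAFETY_GUARD", "SVC_NARASIMHA", "SVC_INTEGRITY", "SVC_DIAMOND"]) name then g.modify "Safety" [] (· ++ [name])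
  else if PySem.Set.contains (PySem.Set.ofList
      ["SVC_FEDERATION", "SVC_FEDERATION_TRANSPORT", "SVC_FEDERATION_RELAY", "SVC_GIT_NADI_SYNC", "SVC_REAPER", "SVC_MARKETPLACE"]) name then g.modify "Federation" [] (· ++ [name])
  else if PySem.Set.contains (PySem.Set.ofList
      ["SVC_IMMUNE", "SVC_FEEDBACK", "SVC_OUROBOROS"]) name then g.modify "Healing" [] (· ++ [name])
  else g.modify "Other" [] (· ++ [name])

-- the dict A's loop maintains, characterized by B's six per-category filters
def pvGroupsOf (svc : List String) : PySem.Dict String (List String) :=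
  PySem.Dict.mk
    [("Cognitive", svc.filter (fun n => (["SVC_ATTENTION", "SVC_MAHA_LLM", "SVC_COMPRESSION", "SVC_ANTARANGA", "SVC_VENU", "SVC_SIKSASTAKAM"] : List String).contains n)),
     ("Memory", svc.filter (fun n => (["SVC_MEMORY", "SVC_SYNAPSE_STORE", "SVC_CACHE", "SVC_KNOWLEDGE_GRAPH", "SVC_TASK_MANAGER"] : List String).contains n)),
     ("Safety", svc.filter (fun n => (["SVC_SAFETY_GUARD", "SVC_NARASIMHA", "SVC_INTEGRITY", "SVC_DIAMOND"] : List String).contains n)),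
     ("Federation", svc.filter (fun n => (["SVC_FEDERATION", "SVC_FEDERATION_TRANSPORT", "SVC_FEDERATION_RELAY", "SVC_GIT_NADI_SYNC", "SVC_REAPER", "SVC_MARKETPLACE"] : List String).contains n)),
     ("Healing", svc.filter (fun n => (["SVC_IMMUNE", "SVC_FEEDBACK", "SVC_OUROBOROS"] : List String).contains n)),
     ("Other", svc.filter (fun n => !(pvKnown.contains n)))]

theorem pv_step_eq (svc : List String) (x : String) :
    pvStepA (pvGroupsOf svc) x = pvGroupsOf (svc ++ [x]) := by
  unfold pvStepA pvGroupsOf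
  simp only [PySem.Set.contains_iff, PySem.Set.mem_ofList, List.mem_cons,
    List.not_mem_nil, or_false, List.filter_append]
  split_ifs with h1 h2 h3 h4 h5
  · rcases h1 with rfl | rfl | rfl | rfl | rfl | rfl <;>
      simp [PySem.Dict.modify, PySem.Dict.insert, PySem.Dict.contains,
        PySem.Dict.getD_eq_get?_getD, PySem.Dict.get?, pvKnown, pvCategories, List.filter]
  · rcases h2 with rfl | rfl | rfl | rfl | rfl <;>
      simp [PySem.Dict.modify, PySem.Dict.insert, PySem.Dict.contains,
        PySem.Dict.getD_eq_get?_getD, PySem.Dict.get?, pvKnown, pvCategories, List.filter]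
  · rcases h3 with rfl | rfl | rfl | rfl <;>
      simp [PySem.Dict.modify, PySem.Dict.insert, PySem.Dict.contains,
        PySem.Dict.getD_eq_get?_getD, PySem.Dict.get?, pvKnown, pvCategories, List.filter]
  · rcases h4 with rfl | rfl | rfl | rfl | rfl | rfl <;>
      simp [PySem.Dict.modify, PySem.Dict.insert, PySem.Dict.contains,
        PySem.Dict.getD_eq_get?_getD, PySem.Dict.get?, pvKnown, pvCategories, List.filter]
  · rcases h5 with rfl | rfl | rfl <;>
      simp [PySem.Dict.modify, PySem.Dict.insert, PySem.Dict.contains,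
        PySem.Dict.getD_eq_get?_getD, PySem.Dict.get?, pvKnown, pvCategories, List.filter]
  · push Not at h1 h2 h3 h4 h5
    obtain ⟨a1, a2, a3, a4, a5, a6⟩ := h1
    obtain ⟨b1, b2, b3, b4, b5⟩ := h2
    obtain ⟨c1, c2, c3, c4⟩ := h3
    obtain ⟨d1, d2, d3, d4, d5, d6⟩ := h4
    obtain ⟨e1, e2, e3⟩ := h5
    simp [PySem.Dict.modify, PySem.Dict.insert, PySem.Dict.contains,
      PySem.Dict.getD_eq_get?_getD, PySem.Dict.get?, pvKnown, pvCategories, List.filter,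
      a1, a2, a3, a4, a5, a6, b1, b2, b3, b4, b5, c1, c2, c3, c4, d1, d2, d3, d4, d5, d6, e1, e2, e3]

theorem pv_foldA_eq (svc : List String) :
    svc.foldl pvStepA (PySem.Dict.ofList
      [("Cognitive", []), ("Memory", []), ("Safety", []), ("Federation", []), ("Healing", []), ("Other", [])])
      = pvGroupsOf svc := by
  induction svc using List.reverseRecOn with
  | nil => decide
  | append_singleton xs x ih =>
      rw [List.foldl_append, ih, List.foldl_cons, List.foldl_nil, pv_step_eq]

-- ===== VERDICT (by name: the statement is the Claim_ definition above) =====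
theorem group_services_py_spec : Claim_equal_group_services_py := by
  intro svc _
  show group_services_py svc = group_services_py_alt svc
  simp only [group_services_py, group_services_py_alt]
  have hb : (PySem.Dict.ofList (pvCategories.map (fun p => (p.1, svc.filter (fun n => p.2.contains n))))).insert
      "Other" (svc.filter (fun n => !(pvKnown.contains n))) = pvGroupsOf svc := by
    simp [pvCategories, pvGroupsOf, PySem.Dict.ofList, PySem.Dict.update,
      PySem.Dict.insert, PySem.Dict.contains, PySem.Dict.empty]
  rw [hb]
  exact congrArg (fun d : PySem.Dict String (List String) => d.items.filter (fun p => !p.2.isEmpty))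
    (pv_foldA_eq svc)
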